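-- pv_equiv track=rewrite | github.com/toastedbreadandomelette/playground | CSES/introductory.py | two_sets
-- ===== SOURCE A (Python) =====
-- def two_sets(n: int) -> int:
--     """
--     Notion: The sets can be divided if sum `n * (n + 1) // 2`
--     can be divided in half, otherwise nope...
--
--     To divide it in two sets:
--     - If n is divisible by 4:
--         - `First set = [1, 2, 3 ... n // 4 - 1] + [3*n // 4 + 1, .... n]`
--         - `Second set = [n/4 + 1, ..., 3*n/4 - 1]`
--
--     - Else
--         - From `n -> n // 2`, get number such that minimum value in first set
--         is greater than `(n * (n + 1) // 4) - sum(first_set)` (the sum we want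
--         to achieve)
--
--     >>> two_sets(7)
--     ([7, 6, 1], [2, 3, 4, 5], 3, 4)
--     >>> two_sets(8)
--     ([1, 2, 7, 8], [3, 4, 5, 6], 4, 4)
--     >>> two_sets(11)
--     ([11, 10, 9, 3], [1, 2, 4, 5, 6, 7, 8], 4, 7)
--     >>> two_sets(15)
--     ([15, 14, 13, 12, 6], [1, 2, 3, 4, 5, 7, 8, 9, 10, 11], 5, 10)
--     >>> two_sets(19)
--     ([19, 18, 17, 16, 15, 10], [1, 2, 3, 4, 5, 6, 7, 8, 9, 11, 12, 13, 14], 6, 13)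
--     """
--     first, second, len_first, len_second = [], [], 0, 0
--     if n % 4 == 0:
--         first = [i for i in range(1, (n // 4) + 1)] + \
--             [i for i in range((3*n)//4 + 1, n + 1)]
--         second = [i for i in range(n // 4 + 1, (3*n) // 4 + 1)]
--         len_first = len_second = n // 2
--     elif (n + 1) % 4 == 0:
--         max_val, divide = n, (n * (n + 1)) // 4
--         while max_val < divide:
--             first.append(max_val)
--             divide -= max_val
--             max_val -= 1
--         first.append(divide)
--         len_first = n - max_val + 1
--         second = [i for i in range(1, max_val + 1) if i != divide]
--         len_second = max_val - 1
--     return first, second, len_first, len_second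
-- ===== SOURCE B (Python) =====
-- def two_sets(n: int) -> int:
--     if n % 4 == 0:
--         q = n // 4
--         first = list(range(1, q + 1)) + list(range(3 * q + 1, n + 1))
--         second = list(range(q + 1, 3 * q + 1))
--         return first, second, n // 2, n // 2
--     if n % 4 != 3:
--         return [], [], 0, 0
--     # n % 4 == 3: the greedy takes descending terms n, n-1, ... while the
--     # remaining target exceeds the next term; find the count k of such terms
--     # by binary search on the closed-form cumulative sum, then build directly.
--     S = n * (n + 1) // 4
--
--     def stops(k):
--         return n - k >= S - (k * n - k * (k - 1) // 2)
--
--     lo, hi = 0, n - 1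
--     while lo < hi:
--         mid = (lo + hi) // 2
--         if stops(mid):
--             hi = mid
--         else:
--             lo = mid + 1
--     k = lo
--     max_val = n - k
--     r = S - (k * n - k * (k - 1) // 2)
--     first = list(range(n, max_val, -1)) + [r]
--     second = [i for i in range(1, max_val + 1) if i != r]
--     return first, second, k + 1, max_val - 1
-- ===== Notes on version B (the rewrite author's own statement) =====
-- stated objective: faster
-- what changed: The O(n) greedy while-loop for n%4==3 is replaced by an O(log n) binary search for its stopping point using the closed-form cumulative sum of the descending terms, after which both result lists are built directly; Pre_ excludes negative n with n%4==3, where A's while-loop never terminates.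
import Mathlib
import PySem

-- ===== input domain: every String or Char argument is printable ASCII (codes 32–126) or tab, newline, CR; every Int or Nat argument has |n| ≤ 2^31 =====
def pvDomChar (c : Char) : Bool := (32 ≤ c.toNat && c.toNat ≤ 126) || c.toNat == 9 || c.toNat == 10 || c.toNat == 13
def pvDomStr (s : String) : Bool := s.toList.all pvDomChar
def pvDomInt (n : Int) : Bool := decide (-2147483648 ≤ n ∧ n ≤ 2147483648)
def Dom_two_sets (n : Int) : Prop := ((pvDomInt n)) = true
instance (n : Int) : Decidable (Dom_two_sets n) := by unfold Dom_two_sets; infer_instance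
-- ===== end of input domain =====

-- B replaces A's O(n) greedy while-loop (n%4==3 branch) by a binary search for its
-- stopping point and builds both lists directly; Pre_ excludes negative n ≡ 3 (mod 4),
-- where A's while-loop never terminates.


-- ===== PORT A =====
-- A's while-loop: state (first, max_val, divide); fuel only makes it total (under
-- Pre_ the loop stops after at most n.toNat iterations, so the fuel is never exhausted).
def twoSetsLoop : Nat → List Int → Int → Int → List Int × Int × Int
  | 0, first, max_val, divide => (first, max_val, divide)
  | fuel + 1, first, max_val, divide =>
    if max_val < divide then
      twoSetsLoop fuel (first ++ [max_val]) (max_val - 1) (divide - max_val)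
    else (first, max_val, divide)

def two_sets (n : Int) : List Int × List Int × Int × Int :=
  if PySem.Int.mod n 4 = 0 then
    let first := PySem.List.pyRange 1 (PySem.Int.floordiv n 4 + 1) 1 ++
                 PySem.List.pyRange (PySem.Int.floordiv (3 * n) 4 + 1) (n + 1) 1
    let second := PySem.List.pyRange (PySem.Int.floordiv n 4 + 1)
                    (PySem.Int.floordiv (3 * n) 4 + 1) 1
    (first, second, PySem.Int.floordiv n 2, PySem.Int.floordiv n 2)
  else if PySem.Int.mod (n + 1) 4 = 0 then
    let (first, max_val, divide) :=
      twoSetsLoop n.toNat [] n (PySem.Int.floordiv (n * (n + 1)) 4)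
    let first := first ++ [divide]
    let second := (PySem.List.pyRange 1 (max_val + 1) 1).filter (fun i => i ≠ divide)
    (first, second, n - max_val + 1, max_val - 1)
  else ([], [], 0, 0)

-- ===== PORT B =====
def altStops (n S k : Int) : Bool :=
  n - k ≥ S - (k * n - PySem.Int.floordiv (k * (k - 1)) 2)

-- B's while-loop (binary search); the fuel only makes it total (hi - lo shrinks each step).
def altSearch : Nat → Int → Int → Int → Int → Int
  | 0, _, _, lo, _ => lo
  | fuel + 1, n, S, lo, hi =>
    if lo < hi then
      let mid := PySem.Int.floordiv (lo + hi) 2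
      if altStops n S mid then altSearch fuel n S lo mid
      else altSearch fuel n S (mid + 1) hi
    else lo

def two_sets_alt (n : Int) : List Int × List Int × Int × Int :=
  if PySem.Int.mod n 4 = 0 then
    let q := PySem.Int.floordiv n 4
    (PySem.List.pyRange 1 (q + 1) 1 ++ PySem.List.pyRange (3 * q + 1) (n + 1) 1,
     PySem.List.pyRange (q + 1) (3 * q + 1) 1,
     PySem.Int.floordiv n 2, PySem.Int.floordiv n 2)
  else if PySem.Int.mod n 4 ≠ 3 then ([], [], 0, 0)
  else
    let S := PySem.Int.floordiv (n * (n + 1)) 4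
    let k := altSearch n.toNat n S 0 (n - 1)
    let max_val := n - k
    let r := S - (k * n - PySem.Int.floordiv (k * (k - 1)) 2)
    (PySem.List.pyRange n max_val (-1) ++ [r],
     (PySem.List.pyRange 1 (max_val + 1) 1).filter (fun i => i ≠ r),
     k + 1, max_val - 1)

-- ===== PRECONDITION & SPEC =====
-- Pre_ excludes negative n with n % 4 == 3: there A's while-loop never terminates
-- (divide grows while max_val shrinks), so A returns no value.
def Pre_two_sets (n : Int) : Prop := PySem.Int.mod n 4 = 3 → 0 ≤ n
instance (n : Int) : Decidable (Pre_two_sets n) := by unfold Pre_two_sets; infer_instance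

def pvWitness_two_sets : Int := 7

def Spec_two_sets (n : Int) (out : List Int × List Int × Int × Int) : Prop := out = two_sets_alt n
instance (n : Int) (out : List Int × List Int × Int × Int) : Decidable (Spec_two_sets n out) := by
  unfold Spec_two_sets; infer_instance

-- ===== CLAIM (what is proved, stated in full; the proofs are below) =====
def Claim_equal_two_sets : Prop :=
  ∀ (n : Int), Dom_two_sets n → Pre_two_sets n → Spec_two_sets n (two_sets n)

-- ===== LEMMAS AND PROOFS =====

-- remaining target after taking the top j terms n, n-1, ..., n-j+1
def dfun (n S k : Int) : Int := S - (k * n - PySem.Int.floordiv (k * (k - 1)) 2)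

theorem fd2 (k : Int) : 2 * PySem.Int.floordiv (k * (k - 1)) 2 = k * (k - 1) := by
  have he : (2 : Int) ∣ k * (k - 1) := by
    have h1 : Even ((k - 1) * ((k - 1) + 1)) := Int.even_mul_succ_self (k - 1)
    have h2 : (k - 1) * ((k - 1) + 1) = k * (k - 1) := by ring
    rw [h2] at h1
    exact h1.two_dvd
  rw [PySem.Int.floordiv_eq_ediv_of_pos (by norm_num)]
  exact Int.mul_ediv_cancel' he

theorem dfun_succ (n S k : Int) : dfun n S (k + 1) = dfun n S k - (n - k) := by
  have h1 := fd2 k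
  have h2 := fd2 (k + 1)
  unfold dfun
  nlinarith [h1, h2]

theorem altStops_iff (n S k : Int) : altStops n S k = true ↔ n - k ≥ dfun n S k := by
  simp [altStops, dfun]

theorem stops_mono (n S : Int) : ∀ (i j : Int), n - i ≥ dfun n S i → i ≤ j → j ≤ n - 1 →
    n - j ≥ dfun n S j := by
  intro i j hi hij hj
  obtain ⟨d, hd⟩ : ∃ d : Nat, j = i + d := ⟨(j - i).toNat, by omega⟩
  subst hd
  induction d with
  | zero => simpa using hi
  | succ d ih =>
    have hd' : i + (d : Int) ≤ n - 1 := by push_cast at hj ⊢; omega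
    have hstep := ih (by omega) hd'
    have := dfun_succ n S (i + d)
    push_cast
    push_cast at hstep this ⊢
    have harg : i + ((d : Int) + 1) = i + (d : Int) + 1 := by ring
    rw [harg]
    omega

theorem loop_run (n S : Int) : ∀ (fuel j K : Nat), j ≤ K → K ≤ j + fuel →
    (∀ i : Nat, i < K → ¬ (n - i ≥ dfun n S i)) →
    (n - K ≥ dfun n S K) →
    ∀ acc : List Int,
      twoSetsLoop fuel acc (n - j) (dfun n S j)
        = (acc ++ (List.range' j (K - j)).map (fun (i : Nat) => n - (i : Int)), n - K, dfun n S K) := by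
  intro fuel
  induction fuel with
  | zero =>
    intro j K h1 h2 _ _ acc
    have : K = j := by omega
    subst this
    simp [twoSetsLoop]
  | succ fuel ih =>
    intro j K h1 h2 hmin hK acc
    by_cases hc : n - (j : Int) < dfun n S j
    · have hjK : j < K := by
        rcases Nat.lt_or_ge j K with h | h
        · exact h
        · have : K = j := by omega
          subst this; omega
      have hrec := ih (j + 1) K (by omega) (by omega) hmin hK (acc ++ [n - j])
      have hstate : dfun n S j - (n - j) = dfun n S (j + 1) := by
        have := dfun_succ n S (j : Int)
        omega
      simp only [twoSetsLoop, if_pos hc]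
      have hcast : (n : Int) - j - 1 = n - ((j : Nat) + 1 : Nat) := by push_cast; ring
      rw [hcast, hstate]
      push_cast at hrec ⊢
      rw [hrec]
      have hrange : List.range' j (K - j) = j :: List.range' (j + 1) (K - (j + 1)) := by
        have : K - j = (K - (j + 1)) + 1 := by omega
        rw [this, List.range'_succ]
      rw [hrange]
      simp
    · have hPj : n - (j : Int) ≥ dfun n S j := by omega
      have : K = j := by
        rcases Nat.lt_or_ge j K with h | h
        · exact absurd hPj (hmin j h)
        · omega
      subst this
      simp [twoSetsLoop, if_neg hc]

theorem search_run (n S : Int) : ∀ (fuel : Nat) (lo hi K : Int),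
    0 ≤ lo → lo ≤ K → K ≤ hi → hi ≤ n - 1 →
    (∀ i : Int, 0 ≤ i → i < K → ¬ (n - i ≥ dfun n S i)) →
    (n - K ≥ dfun n S K) →
    hi - lo ≤ fuel →
    altSearch fuel n S lo hi = K := by
  intro fuel
  induction fuel with
  | zero =>
    intro lo hi K h0 h1 h2 _ _ _ hf
    have : lo = K := by omega
    simpa [altSearch] using this
  | succ fuel ih =>
    intro lo hi K h0 h1 h2 hhi hmin hK hf
    by_cases hc : lo < hi
    · have hmid := PySem.Int.floordiv_two_mid_bounds (le_of_lt hc)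
      set mid := PySem.Int.floordiv (lo + hi) 2 with hmiddef
      have hmidlt : mid < hi := by
        rw [hmiddef]
        rw [PySem.Int.floordiv_lt_iff_lt_mul (by norm_num)]
        omega
      by_cases hs : altStops n S mid = true
      · have hPmid := (altStops_iff n S mid).mp hs
        have hKmid : K ≤ mid := by
          by_contra hlt
          exact (hmin mid (by omega) (by omega)) hPmid
        simp only [altSearch, if_pos hc, ← hmiddef, if_pos hs]
        exact ih lo mid K h0 h1 hKmid (by omega) hmin hK (by omega)
      · have hKmid : mid < K := by
          by_contra hlt
          have hlt' : K ≤ mid := by omega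
          have := stops_mono n S K mid hK hlt' (by omega)
          exact hs ((altStops_iff n S mid).mpr this)
        simp only [altSearch, if_pos hc, ← hmiddef, if_neg hs]
        exact ih (mid + 1) hi K (by omega) (by omega) h2 hhi hmin hK (by omega)
    · have : lo = K := by omega
      simpa [altSearch, if_neg hc] using this

-- ===== VERDICT (by name: the statement is the Claim_ definition above) =====
theorem two_sets_spec : Claim_equal_two_sets := by
  intro n _ hpre
  unfold Spec_two_sets two_sets two_sets_alt
  have hm4 : PySem.Int.mod n 4 = n % 4 := PySem.Int.mod_eq_emod_of_pos (by norm_num)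
  have hm4' : PySem.Int.mod (n + 1) 4 = (n + 1) % 4 := PySem.Int.mod_eq_emod_of_pos (by norm_num)
  have hfam : PySem.Int.floordiv n 4 * 4 + PySem.Int.mod n 4 = n := PySem.Int.floordiv_mul_add_mod n 4
  by_cases h0 : PySem.Int.mod n 4 = 0
  · simp only [if_pos h0]
    have h3q : PySem.Int.floordiv (3 * n) 4 = 3 * PySem.Int.floordiv n 4 := by
      rw [PySem.Int.floordiv_eq_iff_of_pos (by norm_num)]
      omega
    rw [h3q]
  · by_cases h3 : PySem.Int.mod n 4 = 3
    · have hA2 : PySem.Int.mod (n + 1) 4 = 0 := by omega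
      simp only [if_neg h0, if_pos hA2, if_neg (not_not_intro h3)]
      have hn3 : 3 ≤ n := by
        have := hpre h3
        omega
      set S := PySem.Int.floordiv (n * (n + 1)) 4 with hS
      obtain ⟨m, hm, hm0⟩ : ∃ m : Int, n = 4 * m + 3 ∧ 0 ≤ m := ⟨n / 4, by omega, by omega⟩
      have hSval : S = (4 * m + 3) * (m + 1) := by
        rw [hS]
        have hprod : n * (n + 1) = 4 * ((4 * m + 3) * (m + 1)) := by rw [hm]; ring
        rw [hprod, PySem.Int.floordiv_eq_ediv_of_pos (by norm_num),
          Int.mul_ediv_cancel_left _ (by norm_num)]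
      have hwit : n - (((n - 1).toNat : Nat) : Int) ≥ dfun n S (((n - 1).toNat : Nat) : Int) := by
        have hc : (((n - 1).toNat : Nat) : Int) = n - 1 := by omega
        rw [hc]
        have ht := fd2 (n - 1)
        unfold dfun
        nlinarith [ht, hm0, hSval, hm]
      have hex : ∃ k : Nat, n - (k : Int) ≥ dfun n S (k : Int) := ⟨(n - 1).toNat, hwit⟩
      have hKP : n - ((Nat.find hex : Nat) : Int) ≥ dfun n S ((Nat.find hex : Nat) : Int) :=
        Nat.find_spec hex
      set K := Nat.find hex with hKdef
      have hKmin : ∀ i : Nat, i < K → ¬ (n - (i : Int) ≥ dfun n S (i : Int)) :=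
        fun i hi => Nat.find_min hex hi
      have hKle : K ≤ (n - 1).toNat := Nat.find_min' hex hwit
      have hKleInt : (K : Int) ≤ n - 1 := by omega
      have h0d : dfun n S 0 = S := by
        unfold dfun
        rw [show (0 : Int) * ((0 : Int) - 1) = 0 by ring,
          PySem.Int.floordiv_eq_ediv_of_pos (by norm_num)]
        norm_num
      have hloop := loop_run n S n.toNat 0 K (by omega) (by omega) hKmin hKP []
      simp only [Nat.cast_zero, sub_zero, h0d, Nat.sub_zero, List.nil_append] at hloop
      have hsearch := search_run n S n.toNat 0 (n - 1) (K : Int) (by norm_num) (by omega)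
        hKleInt (le_refl _)
        (fun i h0i hiK => by
          have hi : ((i.toNat : Nat) : Int) = i := by omega
          rw [← hi]
          exact hKmin i.toNat (by omega))
        hKP (by omega)
      rw [hloop, hsearch]
      dsimp only
      have hrange : PySem.List.pyRange n (n - (K : Int)) (-1)
          = (List.range' 0 K).map (fun i => n - ((i : Nat) : Int)) := by
        rw [PySem.List.pyRange_neg_one]
        have : (n - (n - (K : Int))).toNat = K := by omega
        rw [this, ← List.range_eq_range']
      have hr : S - ((K : Int) * n - PySem.Int.floordiv ((K : Int) * ((K : Int) - 1)) 2)
          = dfun n S (K : Int) := rfl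
      have hlen : n - (n - (K : Int)) + 1 = (K : Int) + 1 := by ring
      rw [hrange, hr, hlen]
    · have hA2 : PySem.Int.mod (n + 1) 4 ≠ 0 := by omega
      simp only [if_neg h0, if_neg hA2, if_pos h3]
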